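-- pv_equiv track=rewrite | github.com/kubanmar/madas | DOS_fingerprint.py | _find_energy_cutoff_indices
-- ===== SOURCE A (Python) =====
-- def _find_energy_cutoff_indices(energy, estart, estop):
--     """
--     This find the correct indices for the integration, that is, all values of the energy in the interval [estart-1,estop+1] will be in the range [emin_idx,emax_idx]
--     WARNING: Assumes that estart<energy[0]!
--     """
--     emin_idx = None
--     emax_idx = None
--     index = 0
--     while emin_idx is None or emax_idx is None:
--         if energy[index] > estart and emin_idx is None:
--             emin_idx = index - 1
--         if energy[-(index + 1)] < estop and emax_idx is None:
--             emax_idx = -index + 1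
--         index += 1
--     if emax_idx == 0:
--         emax_idx = None
--     return emin_idx, emax_idx
-- ===== SOURCE B (Python) =====
-- def _find_energy_cutoff_indices(energy, estart, estop):
--     """Two independent single-ended scans (front for estart, back for estop)
--     instead of one fused while-loop with None sentinels."""
--     lo = next(i for i, e in enumerate(energy) if e > estart)
--     hi = next(j for j, e in enumerate(reversed(energy)) if e < estop)
--     return lo - 1, (None if hi == 1 else 1 - hi)
-- ===== Notes on version B (the rewrite author's own statement) =====
-- stated objective: simpler
-- what changed: Replaced the fused while-loop that walks both ends at once with None-sentinel state and a post-hoc fixup by two independent first-match scans (front scan for estart, reversed scan for estop) combined arithmetically.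
import Mathlib
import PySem

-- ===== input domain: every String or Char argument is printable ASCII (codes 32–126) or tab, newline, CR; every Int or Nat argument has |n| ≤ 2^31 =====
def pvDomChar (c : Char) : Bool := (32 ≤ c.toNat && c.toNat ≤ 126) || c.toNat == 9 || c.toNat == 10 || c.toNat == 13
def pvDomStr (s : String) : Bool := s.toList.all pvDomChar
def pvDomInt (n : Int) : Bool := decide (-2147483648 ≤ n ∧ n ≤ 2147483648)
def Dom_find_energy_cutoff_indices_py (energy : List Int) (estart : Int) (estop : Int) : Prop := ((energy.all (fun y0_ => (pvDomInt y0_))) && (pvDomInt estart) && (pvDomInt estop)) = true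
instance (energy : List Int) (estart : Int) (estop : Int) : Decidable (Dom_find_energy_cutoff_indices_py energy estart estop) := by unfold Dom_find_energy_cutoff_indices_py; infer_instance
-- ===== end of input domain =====

-- B replaces A's fused sentinel while-loop by two independent first-match scans (front/back); same value on Pre_.

-- ===== PORT A =====
-- A's while loop: fuel counts remaining iterations before the (Pre_-excluded) IndexError
def pvLoopA (energy : List Int) (estart : Int) (estop : Int) :
    Nat → Nat → Option Int → Option Int → Option Int × Option Int
  | 0, _, emin, emax => (emin, emax)
  | fuel+1, index, emin, emax =>
    if emin ≠ none ∧ emax ≠ none then (emin, emax)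
    else
      match PySem.List.pyGet? energy (index : Int), PySem.List.pyGet? energy (-((index : Int) + 1)) with
      | some a, some b =>
          pvLoopA energy estart estop fuel (index + 1)
            (if a > estart ∧ emin = none then some ((index : Int) - 1) else emin)
            (if b < estop ∧ emax = none then some (-(index : Int) + 1) else emax)
      | _, _ => (none, none)   -- IndexError: excluded by Pre_

def find_energy_cutoff_indices_py (energy : List Int) (estart : Int) (estop : Int) : Option Int × Option Int :=
  let r := pvLoopA energy estart estop (energy.length + 1) 0 none none
  if r.2 = some 0 then (r.1, none) else r

-- ===== PORT B =====
def find_energy_cutoff_indices_py_alt (energy : List Int) (estart : Int) (estop : Int) : Option Int × Option Int :=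
  match energy.findIdx? (fun e => decide (estart < e)), energy.reverse.findIdx? (fun e => decide (e < estop)) with
  | some lo, some hi => (some ((lo : Int) - 1), if hi = 1 then none else some (1 - (hi : Int)))
  | _, _ => (none, none)       -- StopIteration: excluded by Pre_

-- ===== PRECONDITION & SPEC =====
-- exactly the inputs on which A's loop terminates (otherwise energy[index] raises IndexError)
def Pre_find_energy_cutoff_indices_py (energy : List Int) (estart : Int) (estop : Int) : Prop :=
  (∃ x ∈ energy, estart < x) ∧ (∃ x ∈ energy, x < estop)
instance (energy : List Int) (estart : Int) (estop : Int) : Decidable (Pre_find_energy_cutoff_indices_py energy estart estop) := by unfold Pre_find_energy_cutoff_indices_py; infer_instance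

def pvWitness_find_energy_cutoff_indices_py : List Int × Int × Int := ([0, 5], 1, 3)

def Spec_find_energy_cutoff_indices_py (energy : List Int) (estart : Int) (estop : Int) (out : Option Int × Option Int) : Prop := out = find_energy_cutoff_indices_py_alt energy estart estop
instance (energy : List Int) (estart : Int) (estop : Int) (out : Option Int × Option Int) : Decidable (Spec_find_energy_cutoff_indices_py energy estart estop out) := by unfold Spec_find_energy_cutoff_indices_py; infer_instance

-- ===== CLAIM (what is proved, stated in full; the proofs are below) =====
def Claim_equal_find_energy_cutoff_indices_py : Prop := ∀ (energy : List Int) (estart : Int) (estop : Int), Dom_find_energy_cutoff_indices_py energy estart estop → Pre_find_energy_cutoff_indices_py energy estart estop → Spec_find_energy_cutoff_indices_py energy estart estop (find_energy_cutoff_indices_py energy estart estop)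

-- ===== LEMMAS AND PROOFS =====

-- the loop invariant: once the front (resp. back) first hit lo (resp. hi) is known,
-- pvLoopA lands on (some (lo-1), some (1-hi)) whenever fuel suffices
theorem pvLoopA_inv (energy : List Int) (estart estop : Int) (lo hi : Nat)
    (hlo : energy.findIdx? (fun e => decide (estart < e)) = some lo)
    (hhi : energy.reverse.findIdx? (fun e => decide (e < estop)) = some hi) :
    ∀ (fuel index : Nat) (emin emax : Option Int),
      (emin = none → index ≤ lo) →
      (∀ v, emin = some v → v = (lo : Int) - 1 ∧ lo < index) →
      (emax = none → index ≤ hi) →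
      (∀ v, emax = some v → v = 1 - (hi : Int) ∧ hi < index) →
      max lo hi < fuel + index →
      pvLoopA energy estart estop fuel index emin emax
        = (some ((lo : Int) - 1), some (1 - (hi : Int))) := by
  obtain ⟨hlo_lt, hlo_pred, hlo_min⟩ := List.findIdx?_eq_some_iff_getElem.mp hlo
  obtain ⟨hhi_lt, hhi_pred, hhi_min⟩ := List.findIdx?_eq_some_iff_getElem.mp hhi
  have hhi_lt' : hi < energy.length := by simpa using hhi_lt
  intro fuel
  induction fuel with
  | zero =>
    intro index emin emax h1 h2 h3 h4 hf
    simp only [Nat.zero_add, Nat.max_lt] at hf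
    cases emin with
    | none => exact absurd (h1 rfl) (by omega)
    | some v =>
      cases emax with
      | none => exact absurd (h3 rfl) (by omega)
      | some w =>
        simp [pvLoopA, (h2 v rfl).1, (h4 w rfl).1]
  | succ fuel ih =>
    intro index emin emax h1 h2 h3 h4 hf
    rw [pvLoopA]
    by_cases hdone : emin ≠ none ∧ emax ≠ none
    · obtain ⟨hv, hw⟩ := hdone
      cases emin with
      | none => exact absurd rfl hv
      | some v =>
        cases emax with
        | none => exact absurd rfl hw
        | some w => simp [(h2 v rfl).1, (h4 w rfl).1]
    · rw [if_neg hdone]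
      have hidx : index < energy.length := by
        rcases not_and_or.mp hdone with h | h
        · have := h1 (not_not.mp h); omega
        · have := h3 (not_not.mp h); omega
      have hget1 : PySem.List.pyGet? energy (index : Int) = some energy[index] := by
        simp [hidx]
      have hget2 : PySem.List.pyGet? energy (-((index : Int) + 1)) = some (energy.reverse[index]'(by simpa using hidx)) := by
        have : -((index : Int) + 1) = -(((index + 1 : Nat) : Int)) := by push_cast; ring
        rw [this, PySem.List.pyGet?_neg_natCast energy (index + 1) (by omega) (by omega)]
        have hlen : energy.length - (index + 1) = energy.length - 1 - index := by omega
        rw [hlen, List.getElem?_eq_getElem (by omega)]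
        congr 1
        rw [List.getElem_reverse]
      rw [hget1, hget2]
      apply ih
      · -- new emin none → index+1 ≤ lo
        intro hn
        split_ifs at hn with hc
        have hle := h1 hn
        rcases Nat.lt_or_ge index lo with h | h
        · omega
        · have : index = lo := by omega
          subst this
          exact absurd ⟨by simpa using hlo_pred, hn⟩ hc
      · -- new emin some v → v = lo-1 ∧ lo < index+1
        intro v hv
        split_ifs at hv with hc
        · obtain ⟨hgt, hnone⟩ := hc
          have hle := h1 hnone
          have : ¬ index < lo := fun hlt => by
            have := hlo_min index hlt
            simp only [decide_eq_true_eq] at this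
            omega
          have heq : index = lo := by omega
          refine ⟨by simp at hv; omega, by omega⟩
        · obtain ⟨he1, he2⟩ := h2 v hv
          exact ⟨he1, by omega⟩
      · -- new emax none → index+1 ≤ hi
        intro hn
        split_ifs at hn with hc
        have hle := h3 hn
        rcases Nat.lt_or_ge index hi with h | h
        · omega
        · have : index = hi := by omega
          subst this
          exact absurd ⟨by simpa using hhi_pred, hn⟩ hc
      · -- new emax some v → v = 1-hi ∧ hi < index+1
        intro v hv
        split_ifs at hv with hc
        · obtain ⟨hlt', hnone⟩ := hc
          have hle := h3 hnone
          have : ¬ index < hi := fun hx => by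
            have := hhi_min index hx
            simp only [decide_eq_true_eq] at this
            omega
          have heq : index = hi := by omega
          refine ⟨by simp at hv; omega, by omega⟩
        · obtain ⟨he1, he2⟩ := h4 v hv
          exact ⟨he1, by omega⟩
      · omega

-- ===== VERDICT (by name: the statement is the Claim_ definition above) =====
theorem find_energy_cutoff_indices_py_spec : Claim_equal_find_energy_cutoff_indices_py := by
  intro energy estart estop _ hpre
  obtain ⟨⟨x, hx, hx2⟩, ⟨y, hy, hy2⟩⟩ := hpre
  have hlo' : (energy.findIdx? (fun e => decide (estart < e))).isSome := by
    rw [List.findIdx?_isSome]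
    exact List.any_eq_true.mpr ⟨x, hx, by simpa using hx2⟩
  have hhi' : (energy.reverse.findIdx? (fun e => decide (e < estop))).isSome := by
    rw [List.findIdx?_isSome]
    exact List.any_eq_true.mpr ⟨y, by simpa using hy, by simpa using hy2⟩
  obtain ⟨lo, hlo⟩ := Option.isSome_iff_exists.mp hlo'
  obtain ⟨hi, hhi⟩ := Option.isSome_iff_exists.mp hhi'
  have hlo_lt : lo < energy.length := (List.findIdx?_eq_some_iff_getElem.mp hlo).1
  have hhi_lt : hi < energy.length := by
    have := (List.findIdx?_eq_some_iff_getElem.mp hhi).1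
    simpa using this
  have hloop := pvLoopA_inv energy estart estop lo hi hlo hhi (energy.length + 1) 0
      none none (fun _ => Nat.zero_le _) (by simp) (fun _ => Nat.zero_le _) (by simp)
      (by omega)
  unfold Spec_find_energy_cutoff_indices_py find_energy_cutoff_indices_py find_energy_cutoff_indices_py_alt
  rw [hlo, hhi]
  simp only [hloop]
  by_cases hone : hi = 1
  · subst hone; simp
  · have : (1 : Int) - (hi : Int) ≠ 0 := by omega
    simp [hone, this]
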